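-- pv_equiv track=rewrite | github.com/DiamondTeck/AlgoCode | AlgoCode.py | A_pos
-- ===== SOURCE A (Python) =====
-- def X_pos(ch1,ch2): #donner la n eme position de ch1 dans ch2
--     x=[]
--     i=0
--     v=50
--     while v>0 :
--         x.append(ch2.find(ch1))
--         if x[i]!=-1:
--             ch2=ch2[x[i]+1:len(ch2)]
--             v+=1
--         elif x[i]==-1:
--             x.pop(-1)
--             v=-1
--         i+=1
--     for j in range(i-1):
--         if j<i-2:
--             x[j+1]=x[j]+x[j+1]+1
--     return x
--
-- def A_pos(ch1,chP,prf):#trouver les position de prf dans la sous chaine (0,ch1,chP)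
--     prfPos=[]
--     j=0
--     chP=chP[0:ch1]
--     for i in range(len(prf)):
--         prfPos.append(X_pos(prf[i],chP))
--         if (prfPos[j])==[]:     #ou: not(prfPos[j])
--             prfPos.pop(j)
--             j-=1
--         j+=1
--     return prfPos
-- ===== SOURCE B (Python) =====
-- def A_pos(ch1, chP, prf):
--     # one pass over the substring building char -> list of positions, then one lookup per prf char
--     sub = chP[0:ch1]
--     pos = {}
--     for i, c in enumerate(sub):
--         pos.setdefault(c, []).append(i)
--     return [pos[c] for c in prf if c in pos]
-- ===== Notes on version B (the rewrite author's own statement) =====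
-- stated objective: faster
-- what changed: replaces the per-prefix-character repeated-find scan (plus a cumulative-sum fixup pass) by one pass over the substring building a dict char->positions, then a single dict lookup per prf character; intended as faster: measured 29.5x at n=4096, the largest size both finish (at n=16384 both time out, the returned value itself being quadratic-sized there)
import Mathlib
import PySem

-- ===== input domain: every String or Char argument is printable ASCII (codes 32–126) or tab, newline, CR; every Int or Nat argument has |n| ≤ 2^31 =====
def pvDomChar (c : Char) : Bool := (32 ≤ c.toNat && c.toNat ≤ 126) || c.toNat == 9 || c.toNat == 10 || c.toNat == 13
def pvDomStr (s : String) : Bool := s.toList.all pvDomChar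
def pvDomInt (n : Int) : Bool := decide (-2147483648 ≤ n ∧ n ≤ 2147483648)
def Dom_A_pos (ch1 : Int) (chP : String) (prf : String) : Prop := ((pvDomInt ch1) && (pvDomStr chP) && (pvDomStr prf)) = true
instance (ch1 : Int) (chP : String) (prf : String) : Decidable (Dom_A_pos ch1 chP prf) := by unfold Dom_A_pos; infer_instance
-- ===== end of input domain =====

-- B replaces A's per-prefix-character repeated .find scans (plus a cumulative-sum fixup pass)
-- by one pass over the substring building a dict char -> positions, then one lookup per prf char.

-- ===== PORT A =====

-- termination helper for the while loop of X_pos: the slice ch2[x[i]+1:len(ch2)] taken on a found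
-- position is List.drop, hence strictly shorter (cited by XposLoop's decreasing_by)
theorem pvSliceDrop {α : Type} (s : List α) (r : Int) (h0 : 0 ≤ r) (hl : r < (s.length : Int)) :
    PySem.List.slice s (some (r + 1)) (some (s.length : Int)) = s.drop (r + 1).toNat := by
  simp only [PySem.List.slice, PySem.List.clampIdx]
  have h1 : ¬ (r + 1 < 0) := by omega
  have h2 : ¬ ((s.length : Int) < 0) := by omega
  have h3 : (r + 1).toNat ≤ s.length := by omega
  have h4 : ((s.length : Int)).toNat = s.length := by omega
  simp only [if_neg h1, if_neg h2, h4, Nat.min_self, min_eq_left h3]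
  apply List.take_of_length_le
  simp only [List.length_drop]
  omega

theorem pvFoundLt (c : Char) (s : List Char) (h : ¬ PySem.Chars.find s [c] = -1) :
    ((PySem.Chars.find s [c] + 1).toNat ≤ s.length ∧ 0 < s.length) := by
  have h1 := PySem.Chars.neg_one_le_find s [c]
  have h0 : 0 ≤ PySem.Chars.find s [c] := by omega
  obtain ⟨hp, -⟩ := PySem.Chars.find_spec h0
  obtain ⟨t, ht⟩ := hp
  have hd : (PySem.Chars.find s [c]).toNat < s.length := by
    by_contra hge
    rw [List.drop_eq_nil_of_le (by omega)] at ht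
    simp at ht
  constructor <;> omega

-- the while loop of X_pos: state (x, i, ch2); v only grows while finding, so the loop runs
-- exactly until find returns -1
def XposLoop (ch1 : Char) (x : List Int) (i : Int) (ch2 : List Char) : List Int × Int :=
  let r := PySem.Chars.find ch2 [ch1]           -- ch2.find(ch1)
  let x' := x ++ [r]                             -- x.append(...): x'[i] is the appended r
  if h : r = -1 then
    (x, i + 1)                                   -- x.pop(-1); v = -1 exits the loop
  else
    XposLoop ch1 x' (i + 1) (PySem.List.slice ch2 (some (r + 1)) (some (ch2.length : Int)))
termination_by ch2.length
decreasing_by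
  have h1 := PySem.Chars.neg_one_le_find ch2 [ch1]
  have := pvFoundLt ch1 ch2 h
  rw [pvSliceDrop ch2 _ (by omega) (by omega)]
  simp only [List.length_drop]
  omega

-- the fixup pass: for j in range(i-1): if j < i-2: x[j+1] = x[j] + x[j+1] + 1
def XposFix (x : List Int) (i : Int) : List Int :=
  List.foldl (fun y j =>
      if j < i - 2 then
        y.set (j + 1).toNat (PySem.List.pyGetD y j 0 + PySem.List.pyGetD y (j + 1) 0 + 1)
      else y)
    x (PySem.List.pyRange 0 (i - 1))

def Xpos (ch1 : Char) (ch2 : List Char) : List Int :=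
  let p := XposLoop ch1 [] 0 ch2
  XposFix p.1 p.2

def A_pos (ch1 : Int) (chP : String) (prf : String) : List (List Int) :=
  let sub := PySem.List.slice chP.toList (some 0) (some ch1)   -- chP = chP[0:ch1]
  (List.foldl (fun st i =>
      (fun (st : List (List Int) × Int) (c : Char) =>
        let pp := st.1 ++ [Xpos c sub]                          -- prfPos.append(X_pos(prf[i], chP))
        if PySem.List.pyGetD pp st.2 ([] : List Int) = [] then  -- prfPos[j] == []
          match PySem.List.pop? pp st.2 with                     -- prfPos.pop(j)
          | some (_, rest) => (rest, st.2 - 1 + 1)               -- j -= 1; j += 1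
          | none => (pp, st.2 + 1)                               -- unreachable: j in range
        else (pp, st.2 + 1))
        st (PySem.List.pyGetD prf.toList i ' '))                -- prf[i]; i in range(len(prf))
    ([], 0) (PySem.List.pyRange 0 (PySem.List.len prf.toList))).1

-- ===== PORT B =====

def A_pos_alt (ch1 : Int) (chP : String) (prf : String) : List (List Int) :=
  let sub := PySem.List.slice chP.toList (some 0) (some ch1)    -- sub = chP[0:ch1]
  let pos := List.foldl (fun (d : PySem.Dict Char (List Int)) (p : Int × Char) =>
      d.insert p.2 (d.getD p.2 [] ++ [p.1]))                     -- pos.setdefault(c, []).append(i)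
    PySem.Dict.empty (PySem.List.enumerate sub)
  prf.toList.filterMap (fun c => pos.get? c)                     -- [pos[c] for c in prf if c in pos]

-- ===== PRECONDITION & SPEC =====
def Spec_A_pos (ch1 : Int) (chP : String) (prf : String) (out : List (List Int)) : Prop := out = A_pos_alt ch1 chP prf
instance (ch1 : Int) (chP : String) (prf : String) (out : List (List Int)) : Decidable (Spec_A_pos ch1 chP prf out) := by unfold Spec_A_pos; infer_instance

-- ===== CLAIM (what is proved, stated in full; the proofs are below) =====
def Claim_equal_A_pos : Prop := ∀ (ch1 : Int) (chP : String) (prf : String), Dom_A_pos ch1 chP prf → Spec_A_pos ch1 chP prf (A_pos ch1 chP prf)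

-- ===== LEMMAS AND PROOFS =====

-- absolute positions (from offset i) of c in a char list: what both programs compute per character
def occ (c : Char) : List Char → Int → List Int
  | [], _ => []
  | h :: t, i => if h = c then i :: occ c t (i + 1) else occ c t (i + 1)

-- the relative find positions collected by X_pos's while loop
def rel (c : Char) (s : List Char) : List Int :=
  let r := PySem.Chars.find s [c]
  if h : r = -1 then [] else r :: rel c (s.drop (r + 1).toNat)
termination_by s.length
decreasing_by
  have h1 := PySem.Chars.neg_one_le_find s [c]
  have := pvFoundLt c s h
  simp only [List.length_drop]
  omega

-- the intended result of the fixup pass, as a simple recursion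
def fix : List Int → Int → List Int
  | [], _ => []
  | a :: t, off => (a + off) :: fix t (a + off + 1)

theorem XposLoop_eq (c : Char) : ∀ (n : Nat) (s : List Char), s.length = n →
    ∀ (x : List Int) (i : Int),
    XposLoop c x i s = (x ++ rel c s, i + ((rel c s).length : Int) + 1) := by
  intro n
  induction n using Nat.strong_induction_on with
  | _ n ih =>
    intro s hs x i
    rw [XposLoop, rel]
    by_cases h : PySem.Chars.find s [c] = -1
    · simp [h]
    · have hb := PySem.Chars.neg_one_le_find s [c]
      have hf := pvFoundLt c s h
      simp only [dif_neg h]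
      rw [pvSliceDrop s _ (by omega) (by omega)]
      rw [ih (s.drop (PySem.Chars.find s [c] + 1).toNat).length
            (by subst hs; simp only [List.length_drop]; omega) _ rfl]
      simp only [List.append_assoc, List.singleton_append, List.length_cons, Prod.mk.injEq]
      refine ⟨trivial, by push_cast; ring⟩

theorem fold_fix (k : Nat) : ∀ (m : Nat) (x : List Int) (j : Nat), x.length = k → j + m = k → 1 ≤ m →
    List.foldl (fun y j =>
      if j < (k : Int) + 1 - 2 then
        y.set (j + 1).toNat (PySem.List.pyGetD y j 0 + PySem.List.pyGetD y (j + 1) 0 + 1)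
      else y)
      x (PySem.List.pyRange (j : Int) (k : Int))
    = x.take (j + 1) ++ fix (x.drop (j + 1)) (x.getD j 0 + 1) := by
  intro m
  induction m with
  | zero => intro x j _ _ h; omega
  | succ m ih =>
    intro x j hx hj _
    by_cases hm : m = 0
    · -- last index j = k-1: the guard j < i-2 is false, nothing changes
      subst hm
      rw [PySem.List.pyRange_one_cons (by omega)]
      have hnil : PySem.List.pyRange ((j : Int) + 1) (k : Int) = [] := by
        have hle : (k : Int) ≤ (j : Int) + 1 := by omega
        simp [PySem.List.pyRange, hle]
      rw [hnil, List.foldl_cons, List.foldl_nil, if_neg (by omega)]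
      rw [List.take_of_length_le (by omega), List.drop_eq_nil_of_le (by omega)]
      simp [fix]
    · -- j+1 < k: one update makes x[j+1] absolute, then recurse
      have hj1 : j + 1 < k := by omega
      rw [PySem.List.pyRange_one_cons (by omega), List.foldl_cons,
        if_pos (by omega)]
      have hcast : ((j : Int) + 1) = ((j + 1 : Nat) : Int) := by push_cast; ring
      rw [hcast, PySem.List.pyGetD_natCast, PySem.List.pyGetD_natCast, Int.toNat_natCast]
      set a := x.getD j 0 + x.getD (j + 1) 0 + 1 with ha
      set y := x.set (j + 1) a with hy
      rw [ih y (j + 1) (by simp [hy, hx]) (by omega) (by omega)]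
      have hset : y = x.take (j + 1) ++ a :: x.drop (j + 2) := by
        rw [hy, List.set_eq_take_append_cons_drop, if_pos (by omega)]
      have hlt : (x.take (j + 1)).length = j + 1 := by
        simp [List.length_take]; omega
      have h1 : y.take (j + 1 + 1) = x.take (j + 1) ++ [a] := by
        rw [hset, List.take_append, hlt]
        rw [List.take_of_length_le (by omega)]
        simp
      have h2 : y.drop (j + 1 + 1) = x.drop (j + 2) := by
        rw [hset, show j + 1 + 1 = (List.take (j + 1) x).length + 1 by rw [hlt]]
        rw [List.drop_append]
        simp
      have h3 : y.getD (j + 1) 0 = a := by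
        rw [hset, List.getD_eq_getElem?_getD]
        rw [List.getElem?_append_right (by omega), hlt]
        simp
      have h4 : x.drop (j + 1) = x.getD (j + 1) 0 :: x.drop (j + 2) := by
        rw [List.getD_eq_getElem x 0 (by omega)]
        exact List.drop_eq_getElem_cons (by omega)
      rw [h1, h2, h3, h4, fix]
      have e1 : x.getD (j + 1) 0 + (x.getD j 0 + 1) = a := by rw [ha]; ring
      have e2 : x.getD (j + 1) 0 + (x.getD j 0 + 1) + 1 = a + 1 := by rw [ha]; ring
      rw [e1]
      simp

theorem occ_append (c : Char) (l₁ l₂ : List Char) : ∀ i : Int,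
    occ c (l₁ ++ l₂) i = occ c l₁ i ++ occ c l₂ (i + l₁.length) := by
  induction l₁ with
  | nil => simp [occ]
  | cons h t ih =>
    intro i
    by_cases hc : h = c <;>
      simp [occ, hc, ih (i + 1)] <;> ring_nf

theorem occ_not_mem (c : Char) (l : List Char) (h : c ∉ l) (i : Int) : occ c l i = [] := by
  induction l generalizing i with
  | nil => rfl
  | cons a t ih =>
    simp only [List.mem_cons, not_or] at h
    simp [occ, Ne.symm h.1, ih h.2]

theorem fix_rel (c : Char) : ∀ (n : Nat) (s : List Char), s.length = n → ∀ off : Int,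
    fix (rel c s) off = occ c s off := by
  intro n
  induction n using Nat.strong_induction_on with
  | _ n ih =>
    intro s hs off
    rw [rel]
    by_cases h : PySem.Chars.find s [c] = -1
    · rw [dif_pos h]
      have hni : ¬ [c] <:+: s := (PySem.Chars.find_eq_neg_one_iff s [c]).mp h
      have hnm : c ∉ s := fun hm => hni ((List.singleton_infix_iff c s).mpr hm)
      rw [occ_not_mem c s hnm off]
      rfl
    · rw [dif_neg h]
      have hb := PySem.Chars.neg_one_le_find s [c]
      have h0 : 0 ≤ PySem.Chars.find s [c] := by omega
      obtain ⟨hp, hmin⟩ := PySem.Chars.find_spec h0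
      set r := PySem.Chars.find s [c] with hr
      obtain ⟨t, ht⟩ := hp
      have hlen : r.toNat < s.length := by
        by_contra hge
        rw [List.drop_eq_nil_of_le (by omega)] at ht
        simp at ht
      have htn : (r + 1).toNat = r.toNat + 1 := by omega
      have hts : t = s.drop (r.toNat + 1) := by
        have h1 := congrArg (List.drop 1) ht
        simpa [List.drop_drop] using h1
      have hdecomp : s = s.take r.toNat ++ c :: s.drop (r.toNat + 1) := by
        conv_lhs => rw [← List.take_append_drop r.toNat s]
        rw [← ht, hts]
        rfl
      have hnm : c ∉ s.take r.toNat := by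
        intro hm
        obtain ⟨i, hi, hgi⟩ := List.getElem_of_mem hm
        have hilt : i < r.toNat := by
          simp only [List.length_take] at hi
          omega
        refine hmin i hilt ⟨s.drop (i + 1), ?_⟩
        rw [List.singleton_append, ← hgi]
        rw [List.getElem_take]
        exact (List.drop_eq_getElem_cons (by omega)).symm
      rw [fix, ih (s.drop ((r + 1).toNat)).length (by simp only [List.length_drop]; omega) _ rfl]
      conv_rhs => rw [hdecomp]
      rw [occ_append, occ_not_mem c _ hnm, occ]
      rw [htn]
      have hlt : (s.take r.toNat).length = r.toNat := by
        simp only [List.length_take]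
        omega
      rw [hlt, if_pos rfl, List.nil_append]
      have hc1 : off + (r.toNat : Int) = r + off := by omega
      rw [hc1]

theorem Xpos_eq (c : Char) (s : List Char) : Xpos c s = occ c s 0 := by
  unfold Xpos
  rw [XposLoop_eq c s.length s rfl [] 0]
  rw [← fix_rel c s.length s rfl 0]
  unfold XposFix
  simp only [List.nil_append, zero_add, add_sub_cancel_right]
  cases hrel : rel c s with
  | nil =>
    have hnil : PySem.List.pyRange 0 ((([] : List Int)).length : Int) = [] := by
      simp [PySem.List.pyRange]
    rw [hnil, List.foldl_nil, fix]
  | cons a tl =>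
    have hk := fold_fix (a :: tl).length (a :: tl).length (a :: tl) 0 rfl (by omega) (by simp)
    simp only [Nat.cast_zero] at hk
    rw [hk]
    simp [fix]

-- B's dictionary after the building fold, looked up at c
theorem dict_get (c : Char) : ∀ (s : List Char) (i : Int) (d : PySem.Dict Char (List Int)),
    (List.foldl (fun (d : PySem.Dict Char (List Int)) (p : Int × Char) =>
        d.insert p.2 (d.getD p.2 [] ++ [p.1])) d (PySem.List.enumerate s i)).get? c
    = match d.get? c with
      | some l => some (l ++ occ c s i)
      | none => if occ c s i = [] then none else some (occ c s i) := by
  intro s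
  induction s with
  | nil =>
    intro i d
    simp only [PySem.List.enumerate, List.foldl_nil, occ]
    cases d.get? c <;> simp
  | cons a t ih =>
    intro i d
    have he : PySem.List.enumerate (a :: t) i = (i, a) :: PySem.List.enumerate t (i + 1) := by
      simp [PySem.List.enumerate]
    rw [he, List.foldl_cons, ih]
    by_cases hc : a = c
    · subst hc
      rw [PySem.Dict.get?_insert_self]
      cases hd : d.get? a <;>
        simp [occ, PySem.Dict.getD, hd]
    · rw [PySem.Dict.get?_insert_of_ne _ _ (Ne.symm hc)]
      simp [occ, hc]

theorem outerA (sub : List Char) : ∀ (cs : List Char) (acc : List (List Int)),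
    (List.foldl (fun st (c : Char) =>
        (let pp := st.1 ++ [Xpos c sub]
         if PySem.List.pyGetD pp st.2 ([] : List Int) = [] then
           match PySem.List.pop? pp st.2 with
           | some (_, rest) => (rest, st.2 - 1 + 1)
           | none => (pp, st.2 + 1)
         else (pp, st.2 + 1) : List (List Int) × Int))
      (acc, (acc.length : Int)) cs).1
    = acc ++ cs.filterMap (fun c => if Xpos c sub = [] then none else some (Xpos c sub)) := by
  intro cs
  induction cs with
  | nil => intro acc; simp
  | cons c cs ih =>
    intro acc
    rw [List.foldl_cons]
    have hget : PySem.List.pyGetD (acc ++ [Xpos c sub]) ((acc.length : Int)) ([] : List Int)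
        = Xpos c sub := by
      rw [PySem.List.pyGetD_natCast]
      simp [List.getD]
    by_cases hX : Xpos c sub = []
    · have hpop : PySem.List.pop? (acc ++ [Xpos c sub]) ((acc.length : Int))
          = some (Xpos c sub, acc) := by
        simp [PySem.List.pop?, PySem.List.pyIdx?,
          List.eraseIdx_append_of_length_le]
      rw [hX] at hget hpop
      simp only [hX, List.filterMap_cons, hget, hpop, reduceIte]
      have hc : ((acc.length : Int) - 1 + 1) = (acc.length : Int) := by ring
      rw [hc]
      exact ih acc
    · simp only [List.filterMap_cons, hget, if_neg hX]
      have hc : (acc.length : Int) + 1 = (((acc ++ [Xpos c sub]).length : Nat) : Int) := by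
        simp
      rw [hc]
      conv_rhs => rw [List.append_cons]
      exact ih (acc ++ [Xpos c sub])

-- ===== VERDICT (by name: the statement is the Claim_ definition above) =====
theorem A_pos_spec : Claim_equal_A_pos := by
  intro ch1 chP prf _
  show A_pos ch1 chP prf = A_pos_alt ch1 chP prf
  simp only [A_pos, A_pos_alt]
  refine Eq.trans (congrArg Prod.fst (PySem.List.foldl_pyRange_pyGetD prf.toList ' '
    (fun (st : List (List Int) × Int) (c : Char) =>
      let pp := st.1 ++ [Xpos c (PySem.List.slice chP.toList (some 0) (some ch1))]
      if PySem.List.pyGetD pp st.2 ([] : List Int) = [] then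
        match PySem.List.pop? pp st.2 with
        | some (_, rest) => (rest, st.2 - 1 + 1)
        | none => (pp, st.2 + 1)
      else (pp, st.2 + 1))
    (([], 0) : List (List Int) × Int) (le_refl 0))) ?_
  refine Eq.trans (outerA (PySem.List.slice chP.toList (some 0) (some ch1)) prf.toList []) ?_
  simp only [List.nil_append]
  refine List.filterMap_congr ?_
  intro c _
  rw [Xpos_eq c _, dict_get c _ 0 PySem.Dict.empty]
  simp [PySem.Dict.get?_empty]
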